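-- pv_equiv track=rewrite | github.com/bibinprathap/VeritasGraph | mcp/powerbi-mcp/backend/services/chat_agent.py | _find_dataset
-- ===== SOURCE A (Python) =====
-- from typing import Any, Dict, List, Optional, Tuple
--
-- def _find_dataset(datasets: List[Dict], name: Optional[str]) -> Optional[Dict]:
--         """Find a dataset by name (fuzzy match)"""
--         if not name:
--             return None
--
--         name_lower = name.lower()
--
--         # Exact match
--         for ds in datasets:
--             if ds.get("name", "").lower() == name_lower:
--                 return ds
--
--         # Partial match
--         for ds in datasets:
--             if name_lower in ds.get("name", "").lower():
--                 return ds
--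
--         return None
-- ===== SOURCE B (Python) =====
-- from typing import Any, Dict, List, Optional, Tuple
--
-- def _find_dataset(datasets: List[Dict], name: Optional[str]) -> Optional[Dict]:
--     """Find a dataset by name (fuzzy match) in a single pass."""
--     if not name:
--         return None
--     name_lower = name.lower()
--     partial = None
--     for ds in datasets:
--         n = ds.get("name", "").lower()
--         if n == name_lower:
--             return ds
--         if partial is None and name_lower in n:
--             partial = ds
--     return partial
-- ===== Notes on version B (the rewrite author's own statement) =====
-- stated objective: alternative
-- what changed: Replaced A's two sequential scans (exact-match pass, then partial-match pass) with a single scan that returns an exact match immediately and remembers the first partial match in an accumulator returned after the loop.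
import Mathlib
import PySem

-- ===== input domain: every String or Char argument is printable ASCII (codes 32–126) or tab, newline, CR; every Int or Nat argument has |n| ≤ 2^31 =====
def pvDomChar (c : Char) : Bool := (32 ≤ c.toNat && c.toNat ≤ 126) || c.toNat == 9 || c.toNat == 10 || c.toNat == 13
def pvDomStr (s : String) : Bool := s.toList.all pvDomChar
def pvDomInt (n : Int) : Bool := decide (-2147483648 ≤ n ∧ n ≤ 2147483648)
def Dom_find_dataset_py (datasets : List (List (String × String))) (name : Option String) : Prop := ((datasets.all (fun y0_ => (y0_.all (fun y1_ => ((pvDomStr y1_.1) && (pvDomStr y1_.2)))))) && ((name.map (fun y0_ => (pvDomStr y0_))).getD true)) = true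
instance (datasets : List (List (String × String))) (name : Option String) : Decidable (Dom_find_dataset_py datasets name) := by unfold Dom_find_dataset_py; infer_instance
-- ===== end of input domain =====

-- B replaces A's two sequential scans by one scan that tracks the first partial match; same result, single pass.

-- shared helper: ds.get("name", "").lower() — the identical expression appears in both Pythons
def pvNameLower (ds : List (String × String)) : String :=
  PySem.Str.lower ((PySem.Dict.mk ds).getD "name" "")

-- ===== PORT A =====
def find_dataset_py (datasets : List (List (String × String))) (name : Option String) : Option (List (String × String)) :=
  match name with
  | none => none
  | some n =>
    if n = "" then none
    else
      let name_lower := PySem.Str.lower n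
      -- exact match loop
      match datasets.find? (fun ds => pvNameLower ds == name_lower) with
      | some ds => some ds
      | none =>
        -- partial match loop
        datasets.find? (fun ds => PySem.Str.isIn name_lower (pvNameLower ds))

-- ===== PORT B =====
-- single loop maintaining the `partial` accumulator
def pvFindLoop (name_lower : String) : List (List (String × String)) → Option (List (String × String)) → Option (List (String × String))
  | [], part => part
  | ds :: rest, part =>
    let n := pvNameLower ds
    if n == name_lower then some ds
    else pvFindLoop name_lower rest
      (if part.isNone && PySem.Str.isIn name_lower n then some ds else part)

def find_dataset_py_alt (datasets : List (List (String × String))) (name : Option String) : Option (List (String × String)) :=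
  match name with
  | none => none
  | some n =>
    if n = "" then none
    else pvFindLoop (PySem.Str.lower n) datasets none

-- ===== PRECONDITION & SPEC =====
def Spec_find_dataset_py (datasets : List (List (String × String))) (name : Option String) (out : Option (List (String × String))) : Prop := out = find_dataset_py_alt datasets name
instance (datasets : List (List (String × String))) (name : Option String) (out : Option (List (String × String))) : Decidable (Spec_find_dataset_py datasets name out) := by unfold Spec_find_dataset_py; infer_instance

-- ===== CLAIM (what is proved, stated in full; the proofs are below) =====
def Claim_equal_find_dataset_py : Prop := ∀ (datasets : List (List (String × String))) (name : Option String), Dom_find_dataset_py datasets name → Spec_find_dataset_py datasets name (find_dataset_py datasets name)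

-- ===== LEMMAS AND PROOFS =====

-- B's single pass computes: first exact match if any, else the accumulator, else the first partial match.
theorem pvFindLoop_eq (nl : String) (l : List (List (String × String))) (part : Option (List (String × String))) :
    pvFindLoop nl l part =
      match l.find? (fun ds => pvNameLower ds == nl) with
      | some ds => some ds
      | none => part.or (l.find? (fun ds => PySem.Str.isIn nl (pvNameLower ds))) := by
  induction l generalizing part with
  | nil => simp [pvFindLoop]
  | cons ds rest ih =>
    simp only [pvFindLoop, List.find?]
    by_cases hx : (pvNameLower ds == nl) = true
    · simp [hx]
    · simp only [Bool.not_eq_true] at hx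
      simp only [hx, Bool.false_eq_true, ite_false]
      rw [ih]
      cases hfind : rest.find? (fun ds => pvNameLower ds == nl) with
      | some d => simp
      | none =>
        cases part with
        | some p => simp
        | none =>
          cases hp : PySem.Chars.isIn nl.toList (pvNameLower ds).toList <;>
            simp [PySem.Str.isIn, hp]

-- ===== VERDICT (by name: the statement is the Claim_ definition above) =====
theorem find_dataset_py_spec : Claim_equal_find_dataset_py := by
  intro datasets name _
  unfold Spec_find_dataset_py find_dataset_py find_dataset_py_alt
  cases name with
  | none => rfl
  | some n =>
    by_cases hn : n = ""
    · simp [hn]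
    · simp only [hn, ite_false]
      rw [pvFindLoop_eq]
      cases h : datasets.find? (fun ds => pvNameLower ds == PySem.Str.lower n) <;> simp
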